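-- pv_equiv track=rewrite | github.com/ARQtty/daedric-encoder | daedric_encoder.py | lenght
-- ===== SOURCE A (Python) =====
-- def lenght(fragment, maxLenSimb):
--     new = ''
--     while len(new) <= maxLenSimb:
--         if len(fragment) != 0:
--             new += fragment[0] + ' '
--             fragment.pop(0)
--         else:
--             return (fragment, new)
--     return (fragment, new)
-- ===== SOURCE B (Python) =====
-- def lenght(fragment, maxLenSimb):
--     # One pass: count how many words are consumed, then slice + join once.
--     # Matches A's in-place mutation of `fragment` (front removal) and return value.
--     k = 0
--     total = 0
--     while k < len(fragment) and total <= maxLenSimb: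
--         total += len(fragment[k]) + 1
--         k += 1
--     new = ''.join(w + ' ' for w in fragment[:k])
--     del fragment[:k]
--     return (fragment, new)
-- ===== Notes on version B (the rewrite author's own statement) =====
-- stated objective: faster
-- what changed: Replaces the repeated string += and fragment.pop(0) loop by a single counting pass over word lengths followed by one slice, one join and one front deletion.
import Mathlib
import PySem

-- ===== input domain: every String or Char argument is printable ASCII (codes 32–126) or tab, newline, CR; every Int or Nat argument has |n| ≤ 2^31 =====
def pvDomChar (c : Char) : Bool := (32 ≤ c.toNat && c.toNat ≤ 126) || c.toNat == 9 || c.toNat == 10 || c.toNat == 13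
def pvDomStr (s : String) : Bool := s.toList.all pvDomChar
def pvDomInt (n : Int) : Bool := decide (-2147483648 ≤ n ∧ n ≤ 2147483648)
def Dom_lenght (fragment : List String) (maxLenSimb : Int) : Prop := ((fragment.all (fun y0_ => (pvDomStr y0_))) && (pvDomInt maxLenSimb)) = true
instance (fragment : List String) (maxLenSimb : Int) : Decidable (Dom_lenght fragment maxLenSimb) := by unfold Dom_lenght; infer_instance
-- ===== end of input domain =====

-- B replaces A's repeated string += / pop(0) loop by one counting pass, a slice, a join and
-- one front deletion (faster in a timing run); equivalence is about the RETURN value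
-- (both Pythons also remove the same consumed prefix of `fragment` in place).

-- ===== PORT A =====
-- String accumulation is ported exactly over List Char (new += w + ' ' ↦ acc ++ w.toList ++ [' ']).
def lenghtLoop : List String → Int → List Char → List String × List Char
  | frag, maxLenSimb, acc =>
    if (acc.length : Int) ≤ maxLenSimb then
      match frag with
      | [] => ([], acc)
      | h :: t => lenghtLoop t maxLenSimb (acc ++ h.toList ++ [' '])
    else (frag, acc)

def lenght (fragment : List String) (maxLenSimb : Int) : List String × String :=
  let r := lenghtLoop fragment maxLenSimb []
  (r.1, String.mk r.2)

-- ===== PORT B =====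
-- counting pass of Source B: k words consumed while the running total stays ≤ maxLenSimb
def countLoop : List String → Int → Int → Nat
  | [], _, _ => 0
  | h :: t, maxLenSimb, total =>
    if total ≤ maxLenSimb then 1 + countLoop t maxLenSimb (total + h.toList.length + 1) else 0

def lenght_alt (fragment : List String) (maxLenSimb : Int) : List String × String :=
  let k := countLoop fragment maxLenSimb 0
  (fragment.drop k, String.mk (((fragment.take k).map (fun w => w.toList ++ [' '])).flatten))

-- ===== PRECONDITION & SPEC =====
def Spec_lenght (fragment : List String) (maxLenSimb : Int) (out : List String × String) : Prop := out = lenght_alt fragment maxLenSimb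
instance (fragment : List String) (maxLenSimb : Int) (out : List String × String) : Decidable (Spec_lenght fragment maxLenSimb out) := by unfold Spec_lenght; infer_instance

-- ===== CLAIM (what is proved, stated in full; the proofs are below) =====
def Claim_equal_lenght : Prop := ∀ (fragment : List String) (maxLenSimb : Int), Dom_lenght fragment maxLenSimb → Spec_lenght fragment maxLenSimb (lenght fragment maxLenSimb)

-- ===== LEMMAS AND PROOFS =====
lemma lenghtLoop_eq (frag : List String) (maxLenSimb : Int) (acc : List Char) :
    lenghtLoop frag maxLenSimb acc =
      (frag.drop (countLoop frag maxLenSimb acc.length),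
       acc ++ ((frag.take (countLoop frag maxLenSimb acc.length)).map
         (fun w => w.toList ++ [' '])).flatten) := by
  induction frag generalizing acc with
  | nil =>
      rw [lenghtLoop]
      simp [countLoop]
  | cons h t ih =>
      rw [lenghtLoop]
      by_cases hle : (acc.length : Int) ≤ maxLenSimb
      · rw [if_pos hle]
        rw [ih]
        have hlen : ((acc ++ h.toList ++ [' ']).length : Int)
            = (acc.length : Int) + h.toList.length + 1 := by
          simp; push_cast; ring
        simp only [countLoop, if_pos hle]
        rw [hlen, Nat.add_comm 1 _]
        simp [List.append_assoc]
      · rw [if_neg hle]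
        simp [countLoop, hle]

-- ===== VERDICT (by name: the statement is the Claim_ definition above) =====
theorem lenght_spec : Claim_equal_lenght := by
  intro fragment maxLenSimb _
  unfold Spec_lenght lenght lenght_alt
  rw [lenghtLoop_eq]
  simp
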